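-- pv_equiv track=rewrite | github.com/iamwangyabin/SPIE | tools/final_footprint.py | snapshot_sum_after_task
-- ===== SOURCE A (Python) =====
-- D = 768
--
-- VIT_B_PARAMS = 85_795_584  # ViT-B/16 backbone without classifier head.
--
-- def linear(in_dim: int, out_dim: int, bias: bool = True) -> int:
--     return in_dim * out_dim + (out_dim if bias else 0)
--
-- def snapshot_sum_after_task(sizes: list[int], start_task: int = 0) -> int:
--     total = 0
--     seen = 0
--     for idx, size in enumerate(sizes):
--         seen += size
--         if idx < start_task:
--             continue
--         total += VIT_B_PARAMS + linear(D, seen, bias=True)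
--     return total
-- ===== SOURCE B (Python) =====
-- D = 768
--
-- VIT_B_PARAMS = 85_795_584  # ViT-B/16 backbone without classifier head.
--
-- def snapshot_sum_after_task(sizes: list[int], start_task: int = 0) -> int:
--     # Closed-form rearrangement: each counted prefix sum contributes (D+1)*prefix,
--     # and element j lands in max(0, n - max(j, lo)) of the counted prefixes.
--     n = len(sizes)
--     lo = max(start_task, 0)
--     count = max(0, n - lo)
--     s = 0
--     for j, size in enumerate(sizes):
--         s += size * max(0, n - max(j, lo))
--     return count * VIT_B_PARAMS + (D + 1) * s
-- ===== Notes on version B (the rewrite author's own statement) =====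
-- stated objective: alternative
-- what changed: Replaces the running prefix-sum plus per-task linear() accumulation by a single weighted pass: element j is weighted by the number of counted prefix sums it appears in, max(0, n - max(j, lo)), and the result is count*VIT_B_PARAMS + (D+1)*S with no prefix sum maintained.
import Mathlib
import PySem

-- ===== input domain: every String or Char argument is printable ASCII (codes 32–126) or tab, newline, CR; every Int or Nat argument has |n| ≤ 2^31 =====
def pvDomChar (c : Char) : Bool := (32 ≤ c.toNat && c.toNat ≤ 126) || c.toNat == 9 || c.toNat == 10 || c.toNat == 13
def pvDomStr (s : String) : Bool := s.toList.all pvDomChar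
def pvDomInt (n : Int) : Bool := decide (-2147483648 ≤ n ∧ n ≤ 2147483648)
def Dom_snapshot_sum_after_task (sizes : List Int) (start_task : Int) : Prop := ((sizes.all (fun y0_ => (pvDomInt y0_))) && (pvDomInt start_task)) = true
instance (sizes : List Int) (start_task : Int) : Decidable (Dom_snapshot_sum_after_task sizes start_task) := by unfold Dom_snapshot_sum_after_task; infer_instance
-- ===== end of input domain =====

-- B replaces A's running prefix sum + per-task linear() with one weighted pass
-- (each element weighted by how many counted prefix sums it lands in); alternative decomposition, same O(n) cost.

-- ===== PORT A =====
def pyLinear (in_dim : Int) (out_dim : Int) (bias : Bool) : Int :=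
  in_dim * out_dim + (if bias then out_dim else 0)

def snapshot_sum_after_task (sizes : List Int) (start_task : Int) : Int :=
  ((PySem.List.enumerate sizes 0).foldl
    (fun (st : Int × Int) p =>
      let seen := st.2 + p.2
      if p.1 < start_task then (st.1, seen)
      else (st.1 + (85795584 + pyLinear 768 seen true), seen))
    (0, 0)).1

-- ===== PORT B =====
def snapshot_sum_after_task_alt (sizes : List Int) (start_task : Int) : Int :=
  let n : Int := sizes.length
  let lo : Int := max start_task 0
  let count : Int := max 0 (n - lo)
  let s : Int := (PySem.List.enumerate sizes 0).foldl
      (fun acc p => acc + p.2 * max 0 (n - max p.1 lo)) 0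
  count * 85795584 + (768 + 1) * s

-- ===== PRECONDITION & SPEC =====
def Spec_snapshot_sum_after_task (sizes : List Int) (start_task : Int) (out : Int) : Prop := out = snapshot_sum_after_task_alt sizes start_task
instance (sizes : List Int) (start_task : Int) (out : Int) : Decidable (Spec_snapshot_sum_after_task sizes start_task out) := by unfold Spec_snapshot_sum_after_task; infer_instance

-- ===== CLAIM (what is proved, stated in full; the proofs are below) =====
def Claim_equal_snapshot_sum_after_task : Prop := ∀ (sizes : List Int) (start_task : Int), Dom_snapshot_sum_after_task sizes start_task → Spec_snapshot_sum_after_task sizes start_task (snapshot_sum_after_task sizes start_task)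

-- ===== LEMMAS AND PROOFS =====

-- Recursive characterisation of A's loop body starting at index k with running sum seen.
def gA (st : Int) : List Int → Int → Int → Int
  | [], _, _ => 0
  | s :: rest, k, seen =>
      (if k < st then 0 else 85795584 + 769 * (seen + s)) + gA st rest (k + 1) (seen + s)

-- Recursive characterisation of B's weighted sum over the suffix starting at index k.
def tS (lo : Int) (n : Int) : List Int → Int → Int
  | [], _ => 0
  | s :: rest, k => s * max 0 (n - max k lo) + tS lo n rest (k + 1)

def stepA (st : Int) (acc : Int × Int) (p : Int × Int) : Int × Int :=
  let seen := acc.2 + p.2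
  if p.1 < st then (acc.1, seen)
  else (acc.1 + (85795584 + pyLinear 768 seen true), seen)

theorem foldA_eq (st : Int) (l : List Int) : ∀ (k t seen : Int),
    ((PySem.List.enumerate l k).foldl (stepA st) (t, seen)).1 = t + gA st l k seen := by
  induction l with
  | nil => intro k t seen; simp [PySem.List.enumerate_nil, gA]
  | cons s rest ih =>
      intro k t seen
      rw [PySem.List.enumerate_cons, List.foldl_cons]
      have h1 : stepA st (t, seen) (k, s)
          = if k < st then (t, seen + s)
            else (t + (85795584 + pyLinear 768 (seen + s) true), seen + s) := rfl
      rw [h1]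
      by_cases h : k < st
      · rw [if_pos h, ih]
        simp only [gA]
        rw [if_pos h]
        ring
      · rw [if_neg h, ih]
        simp only [gA]
        rw [if_neg h]
        simp only [pyLinear, if_pos]
        ring

theorem foldB_eq (lo n : Int) (l : List Int) : ∀ (k acc : Int),
    (PySem.List.enumerate l k).foldl
      (fun acc p => acc + p.2 * max 0 (n - max p.1 lo)) acc = acc + tS lo n l k := by
  induction l with
  | nil => intro k acc; simp [PySem.List.enumerate_nil, tS]
  | cons s rest ih =>
      intro k acc
      rw [PySem.List.enumerate_cons, List.foldl_cons, ih]
      simp only [tS]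
      ring

theorem gA_closed (st : Int) (l : List Int) : ∀ (k seen : Int), 0 ≤ k →
    gA st l k seen =
      max 0 ((k + l.length) - max st k) * 85795584
        + 769 * (seen * max 0 ((k + l.length) - max st k)
                 + tS (max st 0) (k + l.length) l k) := by
  induction l with
  | nil =>
      intro k seen hk
      have h0 : max 0 ((k + ([] : List Int).length) - max st k) = 0 := by
        simp
      rw [h0]; simp [gA, tS]
  | cons s rest ih =>
      intro k seen hk
      have hn : (k + ((s :: rest).length : Int)) = (k + 1) + (rest.length : Int) := by
        push_cast [List.length_cons]; omega
      set n : Int := k + ((s :: rest).length : Int) with hndef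
      have hnk : k + 1 ≤ n := by
        have : (0:Int) ≤ (rest.length : Int) := Int.natCast_nonneg _
        omega
      have ih' := ih (k + 1) (seen + s) (by omega)
      rw [show ((k:Int) + 1 + (rest.length : Int)) = n from hn.symm] at ih'
      simp only [gA, tS]
      rw [ih']
      by_cases h : k < st
      · have hC : max 0 (n - max st k) = max 0 (n - max st (k + 1)) := by omega
        have hW : max 0 (n - max k (max st 0)) = max 0 (n - max st (k + 1)) := by omega
        rw [if_pos h, hC, hW]; ring
      · have hC : max 0 (n - max st k) = max 0 (n - max st (k + 1)) + 1 := by omega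
        have hW : max 0 (n - max k (max st 0)) = max 0 (n - max st (k + 1)) + 1 := by omega
        rw [if_neg h, hC, hW]; ring

-- ===== VERDICT (by name: the statement is the Claim_ definition above) =====
theorem snapshot_sum_after_task_spec : Claim_equal_snapshot_sum_after_task := by
  intro sizes start_task _
  unfold Spec_snapshot_sum_after_task snapshot_sum_after_task snapshot_sum_after_task_alt
  dsimp only
  have hbridge : ((PySem.List.enumerate sizes 0).foldl
      (fun (st : Int × Int) p =>
        let seen := st.2 + p.2
        if p.1 < start_task then (st.1, seen)
        else (st.1 + (85795584 + pyLinear 768 seen true), seen)) ((0 : Int), (0 : Int))).1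
      = ((PySem.List.enumerate sizes 0).foldl (stepA start_task) ((0 : Int), (0 : Int))).1 := rfl
  rw [hbridge, foldA_eq, foldB_eq, gA_closed start_task sizes 0 0 le_rfl]
  have h1 : max 0 (((0:Int) + (sizes.length : Int)) - max start_task 0)
      = max 0 ((sizes.length : Int) - max start_task 0) := by omega
  have h2 : ((0:Int) + (sizes.length : Int)) = (sizes.length : Int) := by ring
  rw [h1, h2]
  ring
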